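-- pv_equiv track=rewrite | github.com/jharjharbink/scrap_nodata | scrap_nodata/pipelines.py | extract_songs_and_length
-- ===== SOURCE A (Python) =====
-- def extract_songs_and_length(all_songs_raw, comment_number):
--
--     # removing comments which are also stored in ol li html tags
--     if comment_number > 0:
--         del all_songs_raw[-comment_number:]
--     elif comment_number == 0:
--         pass
--     else:
--         raise ValueError  # find somthing else
--
--     if len(all_songs_raw) > 0:
--
--         # removing <li> and </li>
--         all_songs_without_html_li_tag = [song[4:-5] for song in all_songs_raw]
--
--         # some character replacement
--         all_songs_striped = [song.strip().replace('\xa0', ' ').replace('\u200e', ' ').replace("&amp;", "&")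
--                              .replace("<strong>", "").replace("</strong>", "")
--                              for song in all_songs_without_html_li_tag if song.strip()]
--
--         # build list of tuples containing song name and length. such as [(song_name, song_length), ...]
--         all_songs_and_length = []
--         for song in all_songs_striped:
--             if song.endswith(")"):
--                 if song[-7] == "(":
--                     if " " in song:
--                         song_and_length = song.rsplit(" ", 1)
--                         all_songs_and_length.append((song_and_length[0], song_and_length[1][1:-1]))
--                     else:
--                         all_songs_and_length.append((song, "unknown_duration"))
--                 elif song[-6] == "(":
--                     song_and_length = song.rsplit("(", 1)
--                     all_songs_and_length.append((song_and_length[0], song_and_length[1][:-1]))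
--                 else:
--                     all_songs_and_length.append((song, "unknown_duration"))
--             else:
--                 all_songs_and_length.append((song, "unknown_duration"))
--
--         # in some case, song name are encapsulate in strong tags. Here, removing theme
--         all_songs_and_length_untaged = []
--         for song in all_songs_and_length:
--             if song[0].startswith("<strong>"):
--                 all_songs_and_length_untaged.append((song[0].replace("<strong>", "").replace("</strong>", ""), song[1]))
--             else:
--                 all_songs_and_length_untaged.append((song[0], song[1]))
--
--         # removing unwanted firsts characters
--         all_songs_and_length_cleaned = []
--         for song in all_songs_and_length_untaged:
--
--             if song[0].startswith(" – "):
--                 if len(song[0]) > 3: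
--                     all_songs_and_length_cleaned.append((song[0][3:], song[1]))
--
--             elif song[0].startswith("– "):
--                 if len(song[0]) > 2:
--                     all_songs_and_length_cleaned.append((song[0][2:], song[1]))
--
--             else:
--                 all_songs_and_length_cleaned.append((song[0], song[1]))
--
--     else:
--         all_songs_and_length_cleaned = []
--
--     return all_songs_and_length_cleaned
-- ===== SOURCE B (Python) =====
-- def extract_songs_and_length(all_songs_raw, comment_number):
--     # single-pass rewrite: same prologue (in-place del kept), then one loop
--     # doing slice/strip/replace, duration parse, untag and dash-strip per song
--     if comment_number < 0:
--         raise ValueError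
--     if comment_number > 0:
--         del all_songs_raw[-comment_number:]
--     result = []
--     for raw in all_songs_raw:
--         s = raw[4:-5].strip()
--         if not s:
--             continue
--         s = (s.replace('\xa0', ' ').replace('\u200e', ' ').replace("&amp;", "&")
--               .replace("<strong>", "").replace("</strong>", ""))
--         if s.endswith(")") and s[-7] == "(":
--             if " " in s:
--                 name, paren = s.rsplit(" ", 1)
--                 pair = (name, paren[1:-1])
--             else:
--                 pair = (s, "unknown_duration")
--         elif s.endswith(")") and s[-6] == "(":
--             name, paren = s.rsplit("(", 1)
--             pair = (name, paren[:-1])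
--         else:
--             pair = (s, "unknown_duration")
--         name, dur = pair
--         if name.startswith("<strong>"):
--             name = name.replace("<strong>", "").replace("</strong>", "")
--         if name.startswith(" – "):
--             if len(name) <= 3:
--                 continue
--             name = name[3:]
--         elif name.startswith("– "):
--             if len(name) <= 2:
--                 continue
--             name = name[2:]
--         result.append((name, dur))
--     return result
-- ===== Notes on version B (the rewrite author's own statement) =====
-- stated objective: simpler
-- what changed: replaces A's five cascading list passes (li-slice map, strip-filter+replace comprehension, duration-parsing loop, <strong>-untag loop, dash-strip loop) with one loop that finishes each song in a single visit, using continue where A's passes drop elements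
import Mathlib
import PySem

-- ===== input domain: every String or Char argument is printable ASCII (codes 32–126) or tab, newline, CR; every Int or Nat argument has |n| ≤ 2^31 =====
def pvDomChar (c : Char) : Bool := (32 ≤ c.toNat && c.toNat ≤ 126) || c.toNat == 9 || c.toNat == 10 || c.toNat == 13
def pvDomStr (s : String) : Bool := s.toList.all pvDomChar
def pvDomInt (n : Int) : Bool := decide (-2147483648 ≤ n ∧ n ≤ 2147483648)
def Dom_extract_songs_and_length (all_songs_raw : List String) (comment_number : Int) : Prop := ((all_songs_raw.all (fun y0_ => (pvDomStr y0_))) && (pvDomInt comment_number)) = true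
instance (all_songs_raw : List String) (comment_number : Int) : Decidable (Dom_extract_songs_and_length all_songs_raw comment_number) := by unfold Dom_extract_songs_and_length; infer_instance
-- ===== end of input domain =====

-- B fuses A's five list passes into ONE loop (simpler, one traversal instead of five);
-- return values proved equal; both Pythons perform the same in-place del on all_songs_raw.

-- ===== PORT A =====
-- A-side helpers: each names the body of one of A's five passes, transliterated step for step.

-- song[4:-5]
def pvSliceLi (song : String) : String := PySem.Str.slice song (some 4) (some (-5))

-- song.strip().replace('\xa0',' ').replace('\u200e',' ').replace("&amp;","&").replace("<strong>","").replace("</strong>","")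
def pvStripRepl (song : String) : String :=
  PySem.Str.replace (PySem.Str.replace (PySem.Str.replace (PySem.Str.replace
    (PySem.Str.replace (PySem.Str.strip song) "\u00A0" " ") "\u200E" " ")
    "&amp;" "&") "<strong>" "") "</strong>" ""

-- body of the duration loop; song.rsplit(sep, 1) with sep known present splits at the
-- LAST occurrence, ported exactly via rfind; Python raises IndexError where pyGet? is
-- none (excluded by Pre_), here the '= some' tests are simply false then.
def pvPair (song : String) : String × String :=
  if PySem.Str.endswith song ")" then
    if PySem.Str.pyGet? song (-7) = some '(' then
      if PySem.Str.isIn " " song then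
        let i := PySem.Str.rfind song " "
        (PySem.Str.slice song none (some i),
         PySem.Str.slice (PySem.Str.slice song (some (i + 1)) none) (some 1) (some (-1)))
      else (song, "unknown_duration")
    else if PySem.Str.pyGet? song (-6) = some '(' then
      let i := PySem.Str.rfind song "("
      (PySem.Str.slice song none (some i),
       PySem.Str.slice (PySem.Str.slice song (some (i + 1)) none) none (some (-1)))
    else (song, "unknown_duration")
  else (song, "unknown_duration")

-- body of the <strong>-untagging loop
def pvUntag (song : String × String) : String × String :=
  if PySem.Str.startswith song.1 "<strong>" then
    (PySem.Str.replace (PySem.Str.replace song.1 "<strong>" "") "</strong>" "", song.2)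
  else (song.1, song.2)

-- body of the leading-dash loop; none = no append ("–" is U+2013 as in the source)
def pvDash (song : String × String) : Option (String × String) :=
  if PySem.Str.startswith song.1 " – " then
    if 3 < PySem.Str.len song.1 then some (PySem.Str.slice song.1 (some 3) none, song.2) else none
  else if PySem.Str.startswith song.1 "– " then
    if 2 < PySem.Str.len song.1 then some (PySem.Str.slice song.1 (some 2) none, song.2) else none
  else some (song.1, song.2)

def extract_songs_and_length (all_songs_raw : List String) (comment_number : Int) : List (String × String) :=
  -- comment_number < 0: Python raises ValueError (excluded by Pre_)
  if comment_number < 0 then []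
  else
    -- del all_songs_raw[-comment_number:] leaves all_songs_raw[:-comment_number]
    let lst := if 0 < comment_number then
                 PySem.List.slice all_songs_raw none (some (-comment_number))
               else all_songs_raw
    if 0 < lst.length then
      let all_songs_without_html_li_tag := lst.map pvSliceLi
      let all_songs_striped :=
        (all_songs_without_html_li_tag.filter (fun song => !(PySem.Str.strip song == ""))).map pvStripRepl
      let all_songs_and_length := all_songs_striped.map pvPair
      let all_songs_and_length_untaged := all_songs_and_length.map pvUntag
      all_songs_and_length_untaged.filterMap pvDash
    else []

-- ===== PORT B =====
-- one pass: Source B's loop body, section by section.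
-- duration if/elif of Source B (flattened 'and' guards); rsplit(sep,1) via rfind as in port A
def pvParse (s : String) : String × String :=
  if PySem.Str.endswith s ")" ∧ PySem.Str.pyGet? s (-7) = some '(' then
    if PySem.Str.isIn " " s then
      let i := PySem.Str.rfind s " "
      (PySem.Str.slice s none (some i),
       PySem.Str.slice (PySem.Str.slice s (some (i + 1)) none) (some 1) (some (-1)))
    else (s, "unknown_duration")
  else if PySem.Str.endswith s ")" ∧ PySem.Str.pyGet? s (-6) = some '(' then
    let i := PySem.Str.rfind s "("
    (PySem.Str.slice s none (some i),
     PySem.Str.slice (PySem.Str.slice s (some (i + 1)) none) none (some (-1)))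
  else (s, "unknown_duration")

-- Source B: name = pair[0], untagged if it starts with <strong>
def pvName (pair : String × String) : String :=
  if PySem.Str.startswith pair.1 "<strong>" then
    PySem.Str.replace (PySem.Str.replace pair.1 "<strong>" "") "</strong>" ""
  else pair.1

-- Source B: leading-dash handling and the final append; none = continue
def pvFinish (name dur : String) : Option (String × String) :=
  if PySem.Str.startswith name " – " then
    if PySem.Str.len name ≤ 3 then none else some (PySem.Str.slice name (some 3) none, dur)
  else if PySem.Str.startswith name "– " then
    if PySem.Str.len name ≤ 2 then none else some (PySem.Str.slice name (some 2) none, dur)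
  else some (name, dur)

-- per-song tail after the strip/replace cleanup
def pvBody (s : String) : Option (String × String) :=
  let pair := pvParse s
  pvFinish (pvName pair) pair.2

-- whole loop body; none = continue
def pvStep (raw : String) : Option (String × String) :=
  if PySem.Str.strip (PySem.Str.slice raw (some 4) (some (-5))) == "" then none
  else
    pvBody (PySem.Str.replace (PySem.Str.replace (PySem.Str.replace (PySem.Str.replace
      (PySem.Str.replace (PySem.Str.strip (PySem.Str.slice raw (some 4) (some (-5)))) " " " ")
      "‎" " ") "&amp;" "&") "<strong>" "") "</strong>" "")

-- the for-loop with continue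
def pvLoop : List String → List (String × String)
  | [] => []
  | raw :: rest =>
    match pvStep raw with
    | none => pvLoop rest
    | some p => p :: pvLoop rest

def extract_songs_and_length_alt (all_songs_raw : List String) (comment_number : Int) : List (String × String) :=
  -- comment_number < 0: Python raises ValueError (excluded by Pre_)
  if comment_number < 0 then []
  else
    pvLoop (if 0 < comment_number then
              PySem.List.slice all_songs_raw none (some (-comment_number))
            else all_songs_raw)

-- ===== PRECONDITION & SPEC =====
-- Pre_ excludes exactly the inputs where Python A raises: comment_number < 0 (ValueError),
-- and any surviving song whose cleaned text ends in ")" but has fewer than 7 characters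
-- (song[-7]/song[-6] IndexError).
def Pre_extract_songs_and_length (all_songs_raw : List String) (comment_number : Int) : Prop :=
  0 ≤ comment_number ∧
  ∀ raw ∈ (if 0 < comment_number then
             PySem.List.slice all_songs_raw none (some (-comment_number))
           else all_songs_raw),
    PySem.Str.endswith (pvStripRepl (pvSliceLi raw)) ")" = true →
      7 ≤ PySem.Str.len (pvStripRepl (pvSliceLi raw))
instance (all_songs_raw : List String) (comment_number : Int) : Decidable (Pre_extract_songs_and_length all_songs_raw comment_number) := by unfold Pre_extract_songs_and_length; infer_instance

def pvWitness_extract_songs_and_length : List String × Int := (["<li>Song One (3:45)</li>"], 0)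

def Spec_extract_songs_and_length (all_songs_raw : List String) (comment_number : Int) (out : List (String × String)) : Prop := out = extract_songs_and_length_alt all_songs_raw comment_number
instance (all_songs_raw : List String) (comment_number : Int) (out : List (String × String)) : Decidable (Spec_extract_songs_and_length all_songs_raw comment_number out) := by unfold Spec_extract_songs_and_length; infer_instance

-- ===== CLAIM (what is proved, stated in full; the proofs are below) =====
def Claim_equal_extract_songs_and_length : Prop := ∀ (all_songs_raw : List String) (comment_number : Int), Dom_extract_songs_and_length all_songs_raw comment_number → Pre_extract_songs_and_length all_songs_raw comment_number → Spec_extract_songs_and_length all_songs_raw comment_number (extract_songs_and_length all_songs_raw comment_number)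


-- ===== LEMMAS AND PROOFS =====

-- flattened 'and'-guards (Source B's if/elif) equal A's nested if/elif tree
theorem pv_ifand {α : Sort u_1} (E P7 Psp P6 : Prop) [Decidable E] [Decidable P7] [Decidable Psp] [Decidable P6] (X X' Y U : α) :
    (if E ∧ P7 then (if Psp then X else X') else if E ∧ P6 then Y else U)
  = (if E then (if P7 then (if Psp then X else X') else if P6 then Y else U) else U) := by
  split_ifs <;> tauto

theorem pvParse_eq (s : String) : pvParse s = pvPair s := by
  unfold pvParse pvPair
  rw [pv_ifand]

theorem pvNameDash_eq (p : String × String) :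
    pvFinish (pvName p) p.2 = pvDash (pvUntag p) := by
  unfold pvFinish pvName pvDash pvUntag
  simp only [apply_ite Prod.fst, apply_ite Prod.snd, ite_self]
  split_ifs <;> first | rfl | omega

theorem pvBody_eq (s : String) : pvBody s = pvDash (pvUntag (pvPair s)) := by
  unfold pvBody
  rw [pvParse_eq, pvNameDash_eq]

-- Source B's whole loop body in terms of A's per-song helpers
theorem pvStep_eq (raw : String) :
    pvStep raw =
      if PySem.Str.strip (pvSliceLi raw) == "" then none
      else pvDash (pvUntag (pvPair (pvStripRepl (pvSliceLi raw)))) := by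
  unfold pvStep pvStripRepl pvSliceLi
  rw [pvBody_eq]

-- A's five passes over any list equal B's single loop
theorem pvLoop_eq (l : List String) :
    ((((l.map pvSliceLi).filter (fun song => !(PySem.Str.strip song == ""))).map
        pvStripRepl).map pvPair |>.map pvUntag).filterMap pvDash = pvLoop l := by
  induction l with
  | nil => rfl
  | cons a rest ih =>
    have hstep := pvStep_eq a
    rw [List.map_cons, List.filter_cons]
    by_cases h : PySem.Str.strip (pvSliceLi a) == ""
    · rw [if_pos h] at hstep
      have hf : (!(PySem.Str.strip (pvSliceLi a) == "")) = false := by rw [h]; rfl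
      rw [hf]
      have hl : pvLoop (a :: rest) = pvLoop rest := by simp only [pvLoop, hstep]
      rw [if_neg (by simp), hl]
      exact ih
    · rw [if_neg h] at hstep
      rw [Bool.not_eq_true] at h
      have hf : (!(PySem.Str.strip (pvSliceLi a) == "")) = true := by rw [h]; rfl
      rw [hf, if_pos rfl, List.map_cons, List.map_cons, List.map_cons, List.filterMap_cons]
      have hl : pvLoop (a :: rest) =
          match pvDash (pvUntag (pvPair (pvStripRepl (pvSliceLi a)))) with
          | none => pvLoop rest
          | some p => p :: pvLoop rest := by simp only [pvLoop, hstep]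
      rw [hl]
      cases pvDash (pvUntag (pvPair (pvStripRepl (pvSliceLi a)))) with
      | none => exact ih
      | some p => exact congrArg (fun t => p :: t) ih

-- ===== VERDICT (by name: the statement is the Claim_ definition above) =====
theorem extract_songs_and_length_spec : Claim_equal_extract_songs_and_length := by
  intro all_songs_raw comment_number _ _
  unfold Spec_extract_songs_and_length extract_songs_and_length extract_songs_and_length_alt
  by_cases hneg : comment_number < 0
  · rw [if_pos hneg, if_pos hneg]
  · rw [if_neg hneg, if_neg hneg]
    dsimp only
    generalize (if 0 < comment_number then
        PySem.List.slice all_songs_raw none (some (-comment_number))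
      else all_songs_raw) = lst
    cases lst with
    | nil => rfl
    | cons a rest =>
      rw [if_pos (by simp)]
      exact pvLoop_eq (a :: rest)
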